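-- pv_equiv track=rewrite | github.com/emm71201/Reducing-Circuit-Depth-with-Qubitwise-Diagonalization | brute_force_optimization.py | linear_swap_cost_optimize
-- ===== SOURCE A (Python) =====
-- def linear_swap_cost(vector):
--
--     n = len(vector)//2
--
--     pivots = [j for j in range(n) if (vector[j] == 1 or vector[j+n] == 1)]
--
--     cost = 0
--     for j in range(len(pivots)-1, 0, -1):
--
--
--         cost += (pivots[j] - pivots[j-1]) - 1
--
--     return cost
--
-- def linear_swap_cost_optimize(vectors):
--
--     curr_vector = vectors[0]
--     curr_cost = linear_swap_cost(curr_vector)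
--
--     for vector in vectors:
--
--         tmp_cost = linear_swap_cost(vector)
--
--         if tmp_cost < curr_cost:
--
--             curr_vector = vector
--             curr_cost = tmp_cost
--
--     return curr_vector
-- ===== SOURCE B (Python) =====
-- def linear_swap_cost_optimize(vectors):
--     def cost(vector):
--         n = len(vector) // 2
--         pivots = [j for j in range(n) if vector[j] == 1 or vector[j + n] == 1]
--         if len(pivots) < 2:
--             return 0
--         return pivots[-1] - pivots[0] - (len(pivots) - 1)
--     return min(vectors, key=cost)
-- ===== Notes on version B (the rewrite author's own statement) =====
-- stated objective: simpler
-- what changed: The per-vector cost is computed by the telescoped closed form (last pivot - first pivot - (#pivots-1)) instead of scanning all consecutive pivot gaps, and the explicit selection loop is replaced by builtin min with that cost as key (same first-minimum tie-breaking).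
import Mathlib
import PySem

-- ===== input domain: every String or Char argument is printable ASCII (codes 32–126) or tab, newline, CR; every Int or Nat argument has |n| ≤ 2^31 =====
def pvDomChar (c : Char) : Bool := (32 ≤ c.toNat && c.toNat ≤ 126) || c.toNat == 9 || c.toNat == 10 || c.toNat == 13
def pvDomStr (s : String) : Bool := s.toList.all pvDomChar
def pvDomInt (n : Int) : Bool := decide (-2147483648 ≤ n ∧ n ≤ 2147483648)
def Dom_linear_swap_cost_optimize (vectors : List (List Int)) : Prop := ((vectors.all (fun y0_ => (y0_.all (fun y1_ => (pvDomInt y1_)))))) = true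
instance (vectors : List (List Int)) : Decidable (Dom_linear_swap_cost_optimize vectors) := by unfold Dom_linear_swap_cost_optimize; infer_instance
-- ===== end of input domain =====

-- B replaces the gap-scanning cost loop by its telescoped closed form and the explicit
-- selection loop by builtin min with that cost as key (same first-minimum tie-breaking); simpler.

-- ===== PORT A =====
-- helper linear_swap_cost of A; indices j and j+n are always in range (n = len//2), so pyGetD is exact
def pvLscA (vector : List Int) : Int :=
  let n : Int := PySem.Int.floordiv (vector.length : Int) 2
  let pivots : List Int := (PySem.List.pyRange 0 n 1).filter
    (fun j => PySem.List.pyGetD vector j 0 == 1 || PySem.List.pyGetD vector (j + n) 0 == 1)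
  (PySem.List.pyRange ((pivots.length : Int) - 1) 0 (-1)).foldl
    (fun cost j => cost + (PySem.List.pyGetD pivots j 0 - PySem.List.pyGetD pivots (j - 1) 0) - 1) 0

def linear_swap_cost_optimize (vectors : List (List Int)) : List Int :=
  match vectors with
  | [] => []  -- Python raises IndexError on vectors[0]; excluded by Pre_
  | v0 :: _ =>
    (vectors.foldl
      (fun s vector =>
        let tmp := pvLscA vector
        if tmp < s.2 then (vector, tmp) else s)
      (v0, pvLscA v0)).1

-- ===== PORT B =====
-- B's closed-form cost helper
def pvLscB (vector : List Int) : Int :=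
  let n : Int := PySem.Int.floordiv (vector.length : Int) 2
  let pivots : List Int := (PySem.List.pyRange 0 n 1).filter
    (fun j => PySem.List.pyGetD vector j 0 == 1 || PySem.List.pyGetD vector (j + n) 0 == 1)
  if pivots.length < 2 then 0
  else PySem.List.pyGetD pivots (-1) 0 - PySem.List.pyGetD pivots 0 0 - ((pivots.length : Int) - 1)

def linear_swap_cost_optimize_alt (vectors : List (List Int)) : List Int :=
  -- Python min raises ValueError on an empty list (excluded by Pre_); the default [] is dead there
  (PySem.List.min? vectors pvLscB).getD []

-- ===== PRECONDITION & SPEC =====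
-- Pre_ excludes only the empty list, on which A raises IndexError (and B raises ValueError)
def Pre_linear_swap_cost_optimize (vectors : List (List Int)) : Prop := vectors ≠ []
instance (vectors : List (List Int)) : Decidable (Pre_linear_swap_cost_optimize vectors) := by
  unfold Pre_linear_swap_cost_optimize; infer_instance

def pvWitness_linear_swap_cost_optimize : List (List Int) := [[1, 0]]

def Spec_linear_swap_cost_optimize (vectors : List (List Int)) (out : List Int) : Prop := out = linear_swap_cost_optimize_alt vectors
instance (vectors : List (List Int)) (out : List Int) : Decidable (Spec_linear_swap_cost_optimize vectors out) := by unfold Spec_linear_swap_cost_optimize; infer_instance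

-- ===== CLAIM (what is proved, stated in full; the proofs are below) =====
def Claim_equal_linear_swap_cost_optimize : Prop := ∀ (vectors : List (List Int)), Dom_linear_swap_cost_optimize vectors → Pre_linear_swap_cost_optimize vectors → Spec_linear_swap_cost_optimize vectors (linear_swap_cost_optimize vectors)

-- ===== LEMMAS AND PROOFS =====

-- the downward gap-sum loop telescopes
lemma pv_foldl_tele_down (F : Int → Int) :
    ∀ (n : Nat) (c0 : Int),
      (PySem.List.pyRange (n : Int) 0 (-1)).foldl
          (fun c j => c + (F j - F (j - 1)) - 1) c0
        = c0 + (F (n : Int) - F 0) - (n : Int) := by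
  intro n
  induction n with
  | zero =>
    intro c0
    rw [PySem.List.pyRange_neg_one_eq_nil (by norm_num)]
    simp
  | succ m ih =>
    intro c0
    rw [show ((m + 1 : Nat) : Int) = (m : Int) + 1 by push_cast; ring]
    rw [PySem.List.pyRange_neg_one_cons (by positivity)]
    simp only [List.foldl_cons]
    rw [show ((m : Int) + 1 - 1) = (m : Int) by ring]
    rw [ih]
    ring

-- the cost loop of A equals B's closed form, for any pivot list
lemma pv_lsc_core (p : List Int) :
    (PySem.List.pyRange ((p.length : Int) - 1) 0 (-1)).foldl
        (fun c j => c + (PySem.List.pyGetD p j 0 - PySem.List.pyGetD p (j - 1) 0) - 1) 0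
      = if p.length < 2 then 0
        else PySem.List.pyGetD p (-1) 0 - PySem.List.pyGetD p 0 0 - ((p.length : Int) - 1) := by
  rcases hL : p.length with _ | m
  · -- empty pivot list
    have hnil : p = [] := List.length_eq_zero_iff.mp hL
    subst hnil
    rw [PySem.List.pyRange_neg_one_eq_nil (by norm_num)]
    simp
  · rw [show (((m + 1 : Nat) : Int) - 1) = ((m : Nat) : Int) by push_cast; ring,
       pv_foldl_tele_down (fun j => PySem.List.pyGetD p j 0) m 0]
    rcases m with _ | k
    · -- single pivot
      simp
    · -- at least two pivots
      rw [if_neg (by omega : ¬ (k + 1 + 1 < 2))]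
      have hne : p ≠ [] := by intro h; subst h; simp at hL
      have hlast : PySem.List.pyGetD p (-1) 0 = PySem.List.pyGetD p ((k + 1 : Nat) : Int) 0 := by
        rw [PySem.List.pyGetD_neg_one p 0 hne, PySem.List.pyGetD_natCast]
        have hk : k + 1 < p.length := by omega
        rw [List.getD_eq_getElem _ _ hk, List.getLast_eq_getElem]
        congr 1
        omega
      rw [hlast]
      push_cast
      ring

lemma pv_lsc_eq (v : List Int) : pvLscA v = pvLscB v := by
  unfold pvLscA pvLscB
  exact pv_lsc_core _

-- min over a two-or-more list keeps the first-minimal head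
lemma pv_min?_cons_cons (f : List Int → Int) (a b : List Int) (t : List (List Int)) :
    PySem.List.min? (a :: b :: t) f
      = PySem.List.min? ((if f b < f a then b else a) :: t) f := by
  by_cases h : f b < f a <;> simp [PySem.List.min?, List.foldl_cons, h]

-- the strict-< selection fold over the tail equals Python's min (first minimal element)
lemma pv_sel_fold (f : List Int → Int) :
    ∀ (t : List (List Int)) (m : List Int),
      (t.foldl (fun s x => if f x < s.2 then (x, f x) else s) (m, f m)).1
        = (PySem.List.min? (m :: t) f).getD [] := by
  intro t
  induction t with
  | nil => intro m; simp [PySem.List.min?, List.foldl_cons]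
  | cons x t ih =>
    intro m
    rw [pv_min?_cons_cons]
    simp only [List.foldl_cons]
    by_cases h : f x < f m
    · rw [if_pos h, if_pos h]
      exact ih x
    · rw [if_neg h, if_neg h]
      exact ih m

-- ===== VERDICT (by name: the statement is the Claim_ definition above) =====
theorem linear_swap_cost_optimize_spec : Claim_equal_linear_swap_cost_optimize := by
  intro vectors _ hpre
  unfold Spec_linear_swap_cost_optimize
  match vectors with
  | [] => exact absurd rfl hpre
  | v0 :: t =>
    unfold linear_swap_cost_optimize linear_swap_cost_optimize_alt
    simp only [pv_lsc_eq, List.foldl_cons, lt_irrefl, if_false]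
    exact pv_sel_fold pvLscB t v0
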